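-- pv_equiv track=rewrite | github.com/washing1127/LeetCode | Solutions/1706/1706.py | findBall
-- ===== SOURCE A (Python) =====
-- from typing import List
--
-- def findBall(grid: List[List[int]]) -> List[int]:
--     m = len(grid)
--     n = len(grid[0])
--     l = [[i] for i in range(n)]
--     for line in grid:
--         new_l = [[] for _ in line]
--         for idx in range(n):
--             if idx == 0 and line[idx] == -1 or idx == n-1 and line[idx] == 1: continue
--             elif line[idx] == -1 and line[idx-1] == 1 or line[idx] == 1 and line[idx+1] == -1: continue
--             elif line[idx] == -1: new_l[idx-1].extend(l[idx])
--             elif line[idx] == 1: new_l[idx+1].extend(l[idx])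
--         l = new_l
--     ret = [-1 for i in range(n)]
--     for idx,li in enumerate(l):
--         for j in li:
--             ret[j] = idx
--     return ret
-- ===== SOURCE B (Python) =====
-- from typing import List
--
-- def findBall(grid: List[List[int]]) -> List[int]:
--     n = len(grid[0])
--
--     def drop(c):
--         pos = c
--         for row in grid:
--             d = row[pos]
--             nc = pos + d
--             if d not in (1, -1) or nc < 0 or nc >= n or row[nc] == -d:
--                 return -1
--             pos = nc
--         return pos
--
--     return [drop(c) for c in range(n)]
-- ===== Notes on version B (the rewrite author's own statement) =====
-- stated objective: simpler
-- what changed: Replaces A's row-by-row propagation of per-column lists of ball ids (plus a final scatter pass into ret) by a direct per-ball simulation that traces each ball's single scalar position through the grid.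
import Mathlib
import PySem

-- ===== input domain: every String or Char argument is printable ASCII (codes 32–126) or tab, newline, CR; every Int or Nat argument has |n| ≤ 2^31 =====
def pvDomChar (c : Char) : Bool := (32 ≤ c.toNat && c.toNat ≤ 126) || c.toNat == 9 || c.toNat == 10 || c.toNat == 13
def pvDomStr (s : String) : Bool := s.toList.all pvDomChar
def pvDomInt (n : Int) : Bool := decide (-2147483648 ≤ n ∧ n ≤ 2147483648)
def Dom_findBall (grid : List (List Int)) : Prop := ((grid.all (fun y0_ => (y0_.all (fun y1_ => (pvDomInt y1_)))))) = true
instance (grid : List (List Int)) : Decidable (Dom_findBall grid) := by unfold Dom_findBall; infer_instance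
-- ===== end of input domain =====

-- B replaces A's row-by-row propagation of per-column lists of ball ids by a direct
-- per-ball simulation of a single scalar position (objective: simpler; same return value).

-- ===== PORT A =====
def pvG (xs : List Int) (i : Int) : Int := (PySem.List.pyGet? xs i).getD 0

def pvExtend (ls : List (List Int)) (j : Nat) (xs : List Int) : List (List Int) :=
  ls.set j (ls.getD j [] ++ xs)

def stepACell (n : Nat) (l : List (List Int)) (line : List Int)
    (new_l : List (List Int)) (idx : Nat) : List (List Int) :=
  if (idx = 0 ∧ pvG line (idx : Int) = -1) ∨ (idx = n - 1 ∧ pvG line (idx : Int) = 1) then new_l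
  else if (pvG line (idx : Int) = -1 ∧ pvG line ((idx : Int) - 1) = 1) ∨
          (pvG line (idx : Int) = 1 ∧ pvG line ((idx : Int) + 1) = -1) then new_l
  else if pvG line (idx : Int) = -1 then pvExtend new_l (idx - 1) (l.getD idx [])
  else if pvG line (idx : Int) = 1 then pvExtend new_l (idx + 1) (l.getD idx [])
  else new_l

def stepA (n : Nat) (l : List (List Int)) (line : List Int) : List (List Int) :=
  (List.range n).foldl (stepACell n l line) (line.map (fun _ => []))

def findBall (grid : List (List Int)) : List Int :=
  let n := (grid.headD []).length
  let l := grid.foldl (stepA n) ((List.range n).map (fun (i : Nat) => [(i : Int)]))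
  (PySem.List.enumerate l 0).foldl
    (fun ret p => p.2.foldl (fun r j => r.set j.toNat p.1) ret)
    ((List.range n).map (fun _ => (-1 : Int)))

-- ===== PORT B =====
def dropB (n : Nat) (rows : List (List Int)) (pos : Int) : Int :=
  match rows with
  | [] => pos
  | row :: rest =>
    let d := pvG row pos
    let nc := pos + d
    if ¬(d = 1 ∨ d = -1) ∨ nc < 0 ∨ (n : Int) ≤ nc ∨ pvG row nc = -d then -1
    else dropB n rest nc

def findBall_alt (grid : List (List Int)) : List Int :=
  let n := (grid.headD []).length
  (List.range n).map (fun (c : Nat) => dropB n grid (c : Int))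

-- ===== PRECONDITION & SPEC =====
-- Pre_ excludes exactly the inputs where A raises an IndexError: the empty grid
-- (len(grid[0])) and grids with a row shorter than grid[0] (line[idx] out of range).
def Pre_findBall (grid : List (List Int)) : Prop :=
  grid ≠ [] ∧ ∀ row ∈ grid, (grid.headD []).length ≤ row.length
instance (grid : List (List Int)) : Decidable (Pre_findBall grid) := by
  unfold Pre_findBall; infer_instance

def pvWitness_findBall : List (List Int) := [[1, 1], [-1, -1]]

def Spec_findBall (grid : List (List Int)) (out : List Int) : Prop := out = findBall_alt grid
instance (grid : List (List Int)) (out : List Int) : Decidable (Spec_findBall grid out) := by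
  unfold Spec_findBall; infer_instance

-- ===== CLAIM (what is proved, stated in full; the proofs are below) =====
def Claim_equal_findBall : Prop :=
  ∀ (grid : List (List Int)), Dom_findBall grid → Pre_findBall grid →
    Spec_findBall grid (findBall grid)

-- ===== LEMMAS AND PROOFS =====

def amove (line : List Int) (n idx : Nat) : Option Nat :=
  if (idx = 0 ∧ pvG line (idx : Int) = -1) ∨ (idx = n - 1 ∧ pvG line (idx : Int) = 1) then none
  else if (pvG line (idx : Int) = -1 ∧ pvG line ((idx : Int) - 1) = 1) ∨
          (pvG line (idx : Int) = 1 ∧ pvG line ((idx : Int) + 1) = -1) then none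
  else if pvG line (idx : Int) = -1 then some (idx - 1)
  else if pvG line (idx : Int) = 1 then some (idx + 1)
  else none

def simP (n : Nat) (rows : List (List Int)) (pos : Int) : Option Int :=
  match rows with
  | [] => some pos
  | row :: rest =>
    let d := pvG row pos
    let nc := pos + d
    if ¬(d = 1 ∨ d = -1) ∨ nc < 0 ∨ (n : Int) ≤ nc ∨ pvG row nc = -d then none
    else simP n rest nc

theorem amove_iff_simP (line : List Int) (n idx j : Nat) (hidx : idx < n)
    (hlen : n ≤ line.length) :
    amove line n idx = some j ↔ simP n [line] (idx : Int) = some (j : Int) := by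
  unfold amove simP
  by_cases hv1 : pvG line (idx : Int) = -1
  · by_cases h0 : idx = 0
    · subst h0
      simp only [Nat.cast_zero] at hv1
      simp [hv1]
    · have e1 : (idx : Int) + -1 = ((idx - 1 : Nat) : Int) := by omega
      have e2 : ((idx : Int) - 1) = ((idx - 1 : Nat) : Int) := by omega
      by_cases hL : pvG line ((idx - 1 : Nat) : Int) = 1
      · simp [hv1, h0, e1, e2, hL]
      · simp [hv1, h0, e1, e2, hL, simP]
        omega
  · by_cases hv2 : pvG line (idx : Int) = 1
    · by_cases hn : idx = n - 1
      · have e1 : ¬ ((idx : Int) + 1 < (n : Int)) := by omega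
        simp [hv2, e1]
        omega
      · have elt : (idx : Int) + 1 < (n : Int) := by omega
        by_cases hR : pvG line ((idx : Int) + 1) = -1
        · simp [hv1, hv2, hn, hR, elt]
        · simp [hv1, hv2, hn, hR, elt, simP]
          omega
    · simp [hv1, hv2]

theorem stepACell_eq (n : Nat) (l : List (List Int)) (line : List Int)
    (new_l : List (List Int)) (idx : Nat) :
    stepACell n l line new_l idx =
      match amove line n idx with
      | none => new_l
      | some j => pvExtend new_l j (l.getD idx []) := by
  simp only [stepACell, amove]
  split_ifs <;> rfl

theorem amove_lt (line : List Int) (n idx j : Nat) (hidx : idx < n)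
    (h : amove line n idx = some j) : j < n := by
  unfold amove at h
  split_ifs at h with h1 h2 h3 h4 <;> simp_all <;> omega

theorem getD_pvExtend (ls : List (List Int)) (t j : Nat) (xs : List Int) (ht : t < ls.length) :
    (pvExtend ls t xs).getD j [] = if j = t then ls.getD t [] ++ xs else ls.getD j [] := by
  unfold pvExtend
  by_cases h : j = t
  · subst h; simp [List.getD, List.getElem?_set_self, ht]
  · simp [List.getD, List.getElem?_set_ne (by omega : t ≠ j), h]

theorem length_pvExtend (ls : List (List Int)) (t : Nat) (xs : List Int) :
    (pvExtend ls t xs).length = ls.length := by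
  simp [pvExtend]

theorem length_foldCells (n : Nat) (l : List (List Int)) (line : List Int)
    (is : List Nat) (acc : List (List Int)) :
    (is.foldl (stepACell n l line) acc).length = acc.length := by
  induction is generalizing acc with
  | nil => rfl
  | cons i rest ih =>
    rw [List.foldl_cons, ih, stepACell_eq]
    cases amove line n i <;> simp [length_pvExtend]

theorem mem_foldCells (n : Nat) (l : List (List Int)) (line : List Int)
    (is : List Nat) (acc : List (List Int)) (hacc : n ≤ acc.length)
    (his : ∀ i ∈ is, i < n) (j : Nat) (hj : j < acc.length) (x : Int) :
    x ∈ (is.foldl (stepACell n l line) acc).getD j [] ↔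
      x ∈ acc.getD j [] ∨ ∃ idx ∈ is, x ∈ l.getD idx [] ∧ amove line n idx = some j := by
  induction is generalizing acc with
  | nil => simp
  | cons i rest ih =>
    have hi : i < n := his i List.mem_cons_self
    rw [List.foldl_cons, stepACell_eq]
    cases hmv : amove line n i with
    | none =>
      rw [ih acc hacc (fun a ha => his a (List.mem_cons_of_mem _ ha)) hj]
      constructor
      · rintro (h | ⟨idx, h1, h2, h3⟩)
        · exact Or.inl h
        · exact Or.inr ⟨idx, List.mem_cons_of_mem _ h1, h2, h3⟩
      · rintro (h | ⟨idx, h1, h2, h3⟩)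
        · exact Or.inl h
        · rcases List.mem_cons.mp h1 with rfl | h1
          · rw [hmv] at h3; exact absurd h3 (by simp)
          · exact Or.inr ⟨idx, h1, h2, h3⟩
    | some t =>
      have ht : t < acc.length := lt_of_lt_of_le (amove_lt line n i t hi hmv) hacc
      rw [ih (pvExtend acc t (l.getD i [])) (by rw [length_pvExtend]; exact hacc)
          (fun a ha => his a (List.mem_cons_of_mem _ ha)) (by rw [length_pvExtend]; exact hj)]
      rw [getD_pvExtend _ _ _ _ ht]
      constructor
      · rintro (h | ⟨idx, h1, h2, h3⟩)
        · by_cases hjt : j = t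
          · rw [if_pos hjt] at h
            rcases List.mem_append.mp h with h | h
            · exact Or.inl (hjt ▸ h)
            · exact Or.inr ⟨i, List.mem_cons_self, h, by rw [hmv, hjt]⟩
          · rw [if_neg hjt] at h; exact Or.inl h
        · exact Or.inr ⟨idx, List.mem_cons_of_mem _ h1, h2, h3⟩
      · rintro (h | ⟨idx, h1, h2, h3⟩)
        · split
          · next hjt => exact Or.inl (List.mem_append.mpr (Or.inl (hjt ▸ h)))
          · exact Or.inl h
        · rcases List.mem_cons.mp h1 with rfl | h1
          · rw [hmv, Option.some.injEq] at h3
            subst h3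
            exact Or.inl (by rw [if_pos rfl]; exact List.mem_append.mpr (Or.inr h2))
          · exact Or.inr ⟨idx, h1, h2, h3⟩

theorem length_stepA (n : Nat) (l : List (List Int)) (line : List Int) :
    (stepA n l line).length = line.length := by
  rw [stepA, length_foldCells, List.length_map]

theorem mem_stepA (n : Nat) (l : List (List Int)) (line : List Int)
    (hlen : n ≤ line.length) (j : Nat) (hj : j < line.length) (x : Int) :
    x ∈ (stepA n l line).getD j [] ↔
      ∃ idx : Nat, idx < n ∧ x ∈ l.getD idx [] ∧ amove line n idx = some j := by
  rw [stepA, mem_foldCells n l line _ _ (by simpa using hlen) (by simp) j (by simpa using hj)]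
  have hempty : (line.map (fun _ => ([] : List Int))).getD j [] = [] := by
    rcases lt_or_ge j line.length with h | h
    · simp [List.getD, List.getElem?_map, h]
    · simp [List.getD, List.getElem?_eq_none (by simpa using h)]
  rw [hempty]
  simp [List.mem_range]

theorem getD_map_range' (f : Nat → List Int) (n j : Nat) (hj : j < n) :
    ((List.range n).map f).getD j [] = f j := by
  simp only [List.getD, List.getElem?_map, List.getElem?_range hj, Option.map_some, Option.getD_some]

def InvP (n : Nat) (pref : List (List Int)) (l : List (List Int)) : Prop :=
  n ≤ l.length ∧
  (∀ j : Nat, j < l.length → ∀ x ∈ l.getD j [],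
      ∃ c : Nat, c < n ∧ x = (c : Int) ∧ simP n pref (c : Int) = some (j : Int)) ∧
  (∀ c : Nat, c < n → ∀ j : Nat, simP n pref (c : Int) = some (j : Int) →
      j < l.length ∧ (c : Int) ∈ l.getD j [])

theorem simP_append (n : Nat) (xs ys : List (List Int)) (p : Int) :
    simP n (xs ++ ys) p = (simP n xs p).bind (simP n ys) := by
  induction xs generalizing p with
  | nil => rfl
  | cons row rest ih =>
    simp only [List.cons_append, simP]
    split
    · rfl
    · exact ih _

theorem simP_bounds (n : Nat) (rows : List (List Int)) (p q : Int)
    (h0 : 0 ≤ p) (h1 : p < n) (h : simP n rows p = some q) : 0 ≤ q ∧ q < n := by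
  induction rows generalizing p with
  | nil => simp only [simP, Option.some.injEq] at h; omega
  | cons row rest ih =>
    simp only [simP] at h
    split at h
    · exact absurd h (by simp)
    · next hcond =>
      push Not at hcond
      exact ih _ hcond.2.1 (by omega) h

theorem invP_step (n : Nat) (pref : List (List Int)) (l : List (List Int))
    (line : List Int) (hlen : n ≤ line.length) (h : InvP n pref l) :
    InvP n (pref ++ [line]) (stepA n l line) := by
  obtain ⟨hL, hii, hiii⟩ := h
  refine ⟨by rw [length_stepA]; exact hlen, ?_, ?_⟩
  · intro j hj x hx
    rw [length_stepA] at hj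
    rw [mem_stepA n l line hlen j hj x] at hx
    obtain ⟨idx, hidx, hmem, hmv⟩ := hx
    obtain ⟨c, hc, rfl, hsim⟩ := hii idx (lt_of_lt_of_le hidx hL) x hmem
    refine ⟨c, hc, rfl, ?_⟩
    rw [simP_append, hsim]
    simpa using (amove_iff_simP line n idx j hidx hlen).mp hmv
  · intro c hc j hsim
    rw [simP_append] at hsim
    cases hq : simP n pref (c : Int) with
    | none => rw [hq] at hsim; exact absurd hsim (by simp)
    | some q =>
      rw [hq] at hsim
      simp only [Option.bind_some] at hsim
      obtain ⟨hq0, hq1⟩ := simP_bounds n pref (c : Int) q (by positivity) (by exact_mod_cast hc) hq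
      have hqn : q = ((q.toNat : Nat) : Int) := by omega
      rw [hqn] at hq hsim
      have hidx : q.toNat < n := by omega
      obtain ⟨hjl, hmem⟩ := hiii c hc q.toNat hq
      have hmv := (amove_iff_simP line n q.toNat j hidx hlen).mpr hsim
      constructor
      · rw [length_stepA]
        exact lt_of_lt_of_le (amove_lt line n q.toNat j hidx hmv) hlen
      · rw [mem_stepA n l line hlen j (lt_of_lt_of_le (amove_lt line n q.toNat j hidx hmv) hlen) _]
        exact ⟨q.toNat, hidx, hmem, hmv⟩

theorem invP_init (n : Nat) :
    InvP n [] ((List.range n).map (fun (i : Nat) => [(i : Int)])) := by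
  refine ⟨by simp, ?_, ?_⟩
  · intro j hj x hx
    simp at hj
    rw [getD_map_range' _ n j hj] at hx
    simp at hx
    exact ⟨j, hj, hx, by simp [simP]⟩
  · intro c hc j hsim
    simp only [simP, Option.some.injEq] at hsim
    have : c = j := by exact_mod_cast hsim
    subst this
    constructor
    · simpa using hc
    · rw [getD_map_range' _ n c hc]
      simp

def innerW (li : List Int) (v : Int) (ret : List Int) : List Int :=
  li.foldl (fun r j => r.set j.toNat v) ret

def WF (ls : List (List Int)) (s : Int) (ret : List Int) : List Int :=
  match ls with
  | [] => ret
  | li :: rest => WF rest (s + 1) (innerW li s ret)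

theorem length_innerW (li : List Int) (v : Int) (ret : List Int) :
    (innerW li v ret).length = ret.length := by
  induction li generalizing ret with
  | nil => rfl
  | cons x rest ih => simp only [innerW, List.foldl_cons] at *; rw [ih, List.length_set]

theorem length_WF (ls : List (List Int)) (s : Int) (ret : List Int) :
    (WF ls s ret).length = ret.length := by
  induction ls generalizing s ret with
  | nil => rfl
  | cons li rest ih => rw [WF, ih, length_innerW]

theorem innerW_miss (li : List Int) (v : Int) (ret : List Int) (c : Nat)
    (hnn : ∀ x ∈ li, 0 ≤ x) (hm : (c : Int) ∉ li) :
    (innerW li v ret)[c]? = ret[c]? := by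
  induction li generalizing ret with
  | nil => rfl
  | cons x rest ih =>
    have hx : x ≠ (c : Int) := fun h => hm (h ▸ List.mem_cons_self)
    have hx0 : 0 ≤ x := hnn x List.mem_cons_self
    have hne : x.toNat ≠ c := by omega
    simp only [innerW, List.foldl_cons] at *
    rw [ih _ (fun y hy => hnn y (List.mem_cons_of_mem _ hy)) (fun h => hm (List.mem_cons_of_mem _ h)),
        List.getElem?_set_ne hne]

theorem innerW_hit (li : List Int) (v : Int) (ret : List Int) (c : Nat)
    (hnn : ∀ x ∈ li, 0 ≤ x) (hm : (c : Int) ∈ li) (hc : c < ret.length) :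
    (innerW li v ret)[c]? = some v := by
  induction li generalizing ret with
  | nil => exact absurd hm (by simp)
  | cons x rest ih =>
    simp only [innerW, List.foldl_cons] at *
    by_cases hr : (c : Int) ∈ rest
    · exact ih _ (fun y hy => hnn y (List.mem_cons_of_mem _ hy)) hr (by rw [List.length_set]; exact hc)
    · have hx : x = (c : Int) := by
        rcases List.mem_cons.mp hm with h | h
        · exact h.symm
        · exact absurd h hr
      have hxc : x.toNat = c := by simp [hx]
      rw [hxc]
      show (innerW rest v (ret.set c v))[c]? = some v
      rw [innerW_miss rest v _ c (fun y hy => hnn y (List.mem_cons_of_mem _ hy)) hr]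
      exact List.getElem?_set_self hc

theorem WF_miss (ls : List (List Int)) (s : Int) (ret : List Int) (c : Nat)
    (hnn : ∀ li ∈ ls, ∀ x ∈ li, 0 ≤ x)
    (hm : ∀ li ∈ ls, (c : Int) ∉ li) :
    (WF ls s ret)[c]? = ret[c]? := by
  induction ls generalizing s ret with
  | nil => rfl
  | cons li rest ih =>
    rw [WF, ih _ _ (fun a ha => hnn a (List.mem_cons_of_mem _ ha))
        (fun a ha => hm a (List.mem_cons_of_mem _ ha)),
      innerW_miss li s ret c (hnn li List.mem_cons_self) (hm li List.mem_cons_self)]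

theorem WF_hit (ls : List (List Int)) (s : Int) (ret : List Int) (c j : Nat)
    (hnn : ∀ li ∈ ls, ∀ x ∈ li, 0 ≤ x)
    (hj : j < ls.length) (hc : c < ret.length)
    (huniq : ∀ k : Nat, k < ls.length → ((c : Int) ∈ ls.getD k [] ↔ k = j)) :
    (WF ls s ret)[c]? = some (s + j) := by
  induction ls generalizing s ret j with
  | nil => exact absurd hj (by simp)
  | cons li rest ih =>
    have h0 := huniq 0 (by simp)
    simp only [List.getD_cons_zero] at h0
    rw [WF]
    cases j with
    | zero =>
      have hmem : (c : Int) ∈ li := h0.mpr rfl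
      have hrest : ∀ a ∈ rest, (c : Int) ∉ a := by
        intro a ha hca
        obtain ⟨k, hget⟩ := List.mem_iff_getElem?.mp ha
        have hk' : k < rest.length := (List.getElem?_eq_some_iff.mp hget).1
        have : rest.getD k [] = a := by simp [List.getD, hget]
        have := (huniq (k + 1) (by simpa using Nat.succ_lt_succ hk')).mp (by
          rw [List.getD_cons_succ, this]; exact hca)
        omega
      rw [WF_miss rest (s+1) _ c (fun a ha => hnn a (List.mem_cons_of_mem _ ha)) hrest,
        innerW_hit li s ret c (hnn li List.mem_cons_self) hmem hc]
      simp
    | succ j' =>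
      have hli : (c : Int) ∉ li := fun h => by have := h0.mp h; omega
      have := ih (s + 1) (innerW li s ret) j'
        (fun a ha => hnn a (List.mem_cons_of_mem _ ha))
        (by simpa using Nat.lt_of_succ_lt_succ (by simpa using hj))
        (by rw [length_innerW]; exact hc)
        (fun k hk => by
          have := huniq (k + 1) (by simpa using Nat.succ_lt_succ hk)
          rw [List.getD_cons_succ] at this
          constructor
          · intro hmem; have := this.mp hmem; omega
          · intro hkj; exact this.mpr (by omega))
      rw [this]
      congr 1
      push_cast
      ring

theorem dropB_eq_simP (n : Nat) (rows : List (List Int)) (pos : Int) :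
    dropB n rows pos = (simP n rows pos).getD (-1) := by
  induction rows generalizing pos with
  | nil => rfl
  | cons row rest ih =>
    simp only [dropB, simP]
    split
    · rfl
    · exact ih _

theorem enumFold_eq_WF (ls : List (List Int)) (s : Int) (ret : List Int) :
    (PySem.List.enumerate ls s).foldl
      (fun ret p => p.2.foldl (fun r j => r.set j.toNat p.1) ret) ret = WF ls s ret := by
  induction ls generalizing s ret with
  | nil => rfl
  | cons li rest ih => simp only [PySem.List.enumerate_cons, List.foldl_cons, WF]; exact ih _ _

theorem invP_fold (n : Nat) (rows pref l : List (List Int))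
    (hlen : ∀ r ∈ rows, n ≤ r.length) (h : InvP n pref l) :
    InvP n (pref ++ rows) (rows.foldl (stepA n) l) := by
  induction rows generalizing pref l with
  | nil => simpa using h
  | cons row rest ih =>
    have := ih (pref ++ [row]) (stepA n l row)
      (fun r hr => hlen r (List.mem_cons_of_mem _ hr))
      (invP_step n pref l row (hlen row List.mem_cons_self) h)
    simpa using this

theorem main_spec (grid : List (List Int))
    (hrows : ∀ row ∈ grid, (grid.headD []).length ≤ row.length) :
    findBall grid = findBall_alt grid := by
  unfold findBall findBall_alt
  set n := (grid.headD []).length with hn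
  set l := grid.foldl (stepA n) ((List.range n).map fun (i : Nat) => [(i : Int)]) with hl
  have hinv : InvP n grid l := by
    have := invP_fold n grid [] _ hrows (invP_init n)
    simpa [hl] using this
  obtain ⟨hlen, hii, hiii⟩ := hinv
  -- every stored ball id is a nonnegative cast
  have hgetD : ∀ li ∈ l, ∃ k : Nat, k < l.length ∧ l.getD k [] = li := by
    intro li hli
    obtain ⟨k, hget⟩ := List.mem_iff_getElem?.mp hli
    exact ⟨k, (List.getElem?_eq_some_iff.mp hget).1, by simp [List.getD, hget]⟩
  have hnn : ∀ li ∈ l, ∀ x ∈ li, 0 ≤ x := by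
    intro li hli x hx
    obtain ⟨k, hk, hkd⟩ := hgetD li hli
    obtain ⟨c, _, rfl, _⟩ := hii k hk x (hkd ▸ hx)
    positivity
  rw [enumFold_eq_WF]
  apply List.ext_getElem?
  intro k
  by_cases hk : k < n
  · have hrhs : ((List.range n).map (fun (c : Nat) => dropB n grid (c : Int)))[k]? =
        some (dropB n grid (k : Int)) := by
      simp [List.getElem?_map, List.getElem?_range hk]
    rw [hrhs, dropB_eq_simP]
    cases hs : simP n grid (k : Int) with
    | none =>
      have hmiss : ∀ li ∈ l, (k : Int) ∉ li := by
        intro li hli hmem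
        obtain ⟨k', hk', hkd⟩ := hgetD li hli
        obtain ⟨c, hc, hcast, hsim⟩ := hii k' hk' _ (hkd ▸ hmem)
        have : c = k := by omega
        subst this
        rw [hs] at hsim
        exact absurd hsim (by simp)
      rw [WF_miss l 0 _ k hnn hmiss, List.getElem?_map, List.getElem?_range hk]
      rfl
    | some q =>
      obtain ⟨hq0, hq1⟩ := simP_bounds n grid _ q (by positivity) (by exact_mod_cast hk) hs
      have hqn : q = ((q.toNat : Nat) : Int) := by omega
      obtain ⟨hjl, hmem⟩ := hiii k hk q.toNat (by rw [← hqn]; exact hs)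
      have huniq : ∀ k' : Nat, k' < l.length → ((k : Int) ∈ l.getD k' [] ↔ k' = q.toNat) := by
        intro k' hk'
        constructor
        · intro hmem'
          obtain ⟨c, hc, hcast, hsim⟩ := hii k' hk' _ hmem'
          have hck : c = k := by omega
          subst hck
          rw [hs] at hsim
          injection hsim with hqk
          omega
        · intro h; subst h; exact hmem
      rw [WF_hit l 0 _ k q.toNat hnn hjl (by simpa using hk) huniq]
      simp only [Option.getD_some]
      congr 1
      omega
  · rw [List.getElem?_eq_none (by rw [length_WF]; simp only [List.length_map, List.length_range]; omega),
        List.getElem?_eq_none (by simp only [List.length_map, List.length_range]; omega)]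

-- ===== VERDICT (by name: the statement is the Claim_ definition above) =====
theorem findBall_spec : Claim_equal_findBall := by
  intro grid _ hpre
  unfold Spec_findBall
  exact main_spec grid hpre.2
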